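-- pv_equiv track=rewrite | github.com/super-learners/algorithm-study | codejam/20190219/senate-evacuation.andi.py | solve
-- ===== SOURCE A (Python) =====
-- def solve(senators):
--   plan = []
--   party_n_senators = [(chr(ord("A") + x[0]), x[1]) for x in enumerate(senators)]
--   party_n_senators = sorted(party_n_senators, key=lambda e: e[1], reverse=True)
--   def party_of(pns):
--     return pns[0]
--   def num_senator_of(pns):
--     return pns[1]
--   def dec_num_senator_of(pns_list, idx):
--     pns_list[idx] = (pns_list[idx][0], pns_list[idx][1] - 1)
--
--   while True:
--     plan.append(party_of(party_n_senators[0]))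
--     dec_num_senator_of(party_n_senators, 0)
--     if num_senator_of(party_n_senators[0]) == 0:
--       party_n_senators.pop(0)
--
--     if len(party_n_senators) == 0:
--       return plan
--
--     party_n_senators = sorted(party_n_senators, key=lambda e: e[1], reverse=True)
--
--     if num_senator_of(party_n_senators[0]) * 2 <= sum([num_senator_of(x) for x in party_n_senators]):
--       continue
--
--     plan.append(plan.pop() + party_of(party_n_senators[0]))
--     dec_num_senator_of(party_n_senators, 0)
--     if num_senator_of(party_n_senators[0]) == 0:
--       party_n_senators.pop(0)
--
--     if len(party_n_senators) == 0:
--       return plan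
--
--     party_n_senators = sorted(party_n_senators, key=lambda e: e[1], reverse=True)
--
--   return plan
-- ===== SOURCE B (Python) =====
-- def solve(senators):
--     # Fixed-position table, no sorting: each party keeps (remaining, stamp) where
--     # stamp is the time of its last pick (initially -index); each step selects the
--     # lexicographically largest (remaining, stamp) by one scan, which reproduces
--     # the stable-sort order without ever reordering anything.
--     state = [(c, -i) for i, c in enumerate(senators)]
--     total = sum(senators)
--     plan = []
--     t = 1
--     while total > 0:
--         i = _argmax(state)
--         c = state[i][0]
--         state[i] = (c - 1, t)
--         t += 1
--         total -= 1
--         step = chr(65 + i)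
--         if total > 0:
--             j = _argmax(state)
--             d = state[j][0]
--             if 2 * d > total:
--                 state[j] = (d - 1, t)
--                 t += 1
--                 total -= 1
--                 step += chr(65 + j)
--         plan.append(step)
--     return plan
--
--
-- def _argmax(state):
--     best = -1
--     for i in range(len(state)):
--         if state[i][0] > 0 and (best < 0 or state[i] > state[best]):
--             best = i
--     return best
-- ===== Notes on version B (the rewrite author's own statement) =====
-- stated objective: alternative
-- what changed: B abandons A's sorted shrinking list entirely: it keeps a fixed per-party table of (remaining, stamp of last pick) pairs and selects each evacuee by one linear scan for the lexicographically largest pair, the stamp reproducing the stable re-sort's tie order without ever sorting or reordering anything.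
-- outside the precondition, e.g. on solve([]): A raises IndexError, B returns []; on solve([0]): A does not finish within the time limit, B returns []
-- crash fix: On senators = [] A raises IndexError (it indexes the empty party list); B returns []. — e.g. on solve([]): A raises IndexError, B returns []
import Mathlib
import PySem

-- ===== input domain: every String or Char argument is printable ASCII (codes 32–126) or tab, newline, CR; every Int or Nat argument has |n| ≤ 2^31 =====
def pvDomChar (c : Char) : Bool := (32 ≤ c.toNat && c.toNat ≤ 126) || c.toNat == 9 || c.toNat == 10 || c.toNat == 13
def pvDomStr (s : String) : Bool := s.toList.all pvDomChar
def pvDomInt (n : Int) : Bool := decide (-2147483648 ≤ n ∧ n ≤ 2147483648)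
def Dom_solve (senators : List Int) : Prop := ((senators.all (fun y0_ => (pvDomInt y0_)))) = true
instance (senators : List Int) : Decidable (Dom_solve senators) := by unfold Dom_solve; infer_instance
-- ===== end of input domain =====

-- B never sorts or reorders: it keeps a fixed per-party table of (remaining, stamp of last
-- pick) and selects each pick by a single linear scan for the lexicographically largest
-- (remaining, stamp) pair (objective: alternative — same cost class, no sorting at all).

-- chr(ord("A") + i), shared by both ports
def chrOf (i : Int) : String := String.ofList [Char.ofNat (65 + i).toNat]

-- ===== PORT A =====
-- fuel-guarded transliteration of A's `while True` loop; fuel (total senator count + 1) is a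
-- totality guard only and is never exhausted on inputs satisfying Pre_solve
def solveLoopA : Nat → List String → List (String × Int) → List String
  | 0, plan, _ => plan
  | Nat.succ f, plan, pns =>
    match pns with
    | [] => plan   -- Python raises IndexError here (only reachable for senators = [], outside Pre_)
    | (p, c) :: rest =>
      let plan1 := plan ++ [p]                                   -- plan.append(party_of(pns[0]))
      let l2 := if c - 1 = 0 then rest else (p, c - 1) :: rest   -- dec; pop(0) if count == 0
      if l2 = [] then plan1
      else
        let l3 := PySem.List.sorted l2 (fun e => e.2) true
        if (l3.headD ("", 0)).2 * 2 ≤ (l3.map (fun x => x.2)).sum then  -- l3 ≠ [] here: headD default unused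
          solveLoopA f plan1 l3
        else
          match l3 with
          | [] => plan1   -- unreachable: l3 is a permutation of the nonempty l2
          | (q, d) :: rest2 =>
            let plan2 := plan1.dropLast ++ [plan1.getLastD "" ++ q]    -- plan.append(plan.pop() + party)
            let l4 := if d - 1 = 0 then rest2 else (q, d - 1) :: rest2
            if l4 = [] then plan2
            else solveLoopA f plan2 (PySem.List.sorted l4 (fun e => e.2) true)

def solve (senators : List Int) : List String :=
  let pns := (PySem.List.enumerate senators).map (fun x => (chrOf x.1, x.2))
  solveLoopA ((senators.map Int.toNat).sum + 1) []
    (PySem.List.sorted pns (fun e => e.2) true)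

-- ===== PORT B =====
-- Python tuple comparison e > bkey on (count, stamp) pairs
def pairGtB (x y : Int × Int) : Bool := decide (y.1 < x.1) || (decide (x.1 = y.1) && decide (y.2 < x.2))

-- the `for i, e in enumerate(state)` scan of Source B's _argmax (best index, best key)
def argmaxB (state : List (Int × Int)) : Int :=
  ((PySem.List.enumerate state).foldl
    (fun acc x => if 0 < x.2.1 ∧ (acc.1 < 0 ∨ pairGtB x.2 acc.2 = true) then x else acc)
    (-1, (0, 0))).1

-- fuel-guarded transliteration of Source B's `while total > 0` loop (fuel = total + 1, a
-- totality guard only, never exhausted on inputs satisfying Pre_solve)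
def solveLoopC : Nat → List String → List (Int × Int) → Int → Int → List String
  | 0, plan, _, _, _ => plan
  | Nat.succ f, plan, state, total, t =>
    if total ≤ 0 then plan
    else
      let i := argmaxB state
      let c := ((PySem.List.pyGet? state i).getD (0, 0)).1
      let state1 := PySem.List.pySetD state i (c - 1, t)
      let total1 := total - 1
      if 0 < total1 then
        let j := argmaxB state1
        let d := ((PySem.List.pyGet? state1 j).getD (0, 0)).1
        if 2 * d > total1 then
          solveLoopC f (plan ++ [chrOf i ++ chrOf j])
            (PySem.List.pySetD state1 j (d - 1, t + 1)) (total1 - 1) (t + 2)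
        else
          solveLoopC f (plan ++ [chrOf i]) state1 total1 (t + 1)
      else
        solveLoopC f (plan ++ [chrOf i]) state1 total1 (t + 1)

def solve_alt (senators : List Int) : List String :=
  let state := (PySem.List.enumerate senators).map (fun x => (x.2, -x.1))
  solveLoopC ((senators.map Int.toNat).sum + 1) [] state senators.sum 1

-- ===== PRECONDITION & SPEC =====
-- Pre_ excludes senators = [] (A raises IndexError) and lists containing a count ≤ 0
-- (A loops forever on those); on every other input A returns normally.
def Pre_solve (senators : List Int) : Prop := senators ≠ [] ∧ ∀ c ∈ senators, 1 ≤ c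
instance (senators : List Int) : Decidable (Pre_solve senators) := by unfold Pre_solve; infer_instance

def pvWitness_solve : List Int := [2, 3, 1]

-- On senators = [] A raises IndexError (it indexes party_n_senators[0] of an empty list); B returns [].
def Raises_solve (senators : List Int) : Prop := senators = []
instance (senators : List Int) : Decidable (Raises_solve senators) := by unfold Raises_solve; infer_instance
def pvRaiseWitness_solve : List Int := []
def pvRaiseWitnessOut_solve : List String := []

def Spec_solve (senators : List Int) (out : List String) : Prop := out = solve_alt senators
instance (senators : List Int) (out : List String) : Decidable (Spec_solve senators out) := by unfold Spec_solve; infer_instance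

-- ===== CLAIM (what is proved, stated in full; the proofs are below) =====
def Claim_equal_solve : Prop := ∀ (senators : List Int), Dom_solve senators → Pre_solve senators → Spec_solve senators (solve senators)
def Claim_raises_solve : Prop := (∀ (senators : List Int), Dom_solve senators → Raises_solve senators → ¬ Pre_solve senators) ∧ (Dom_solve (pvRaiseWitness_solve) ∧ Raises_solve (pvRaiseWitness_solve) ∧ solve_alt (pvRaiseWitness_solve) = pvRaiseWitnessOut_solve)

-- ===== LEMMAS AND PROOFS =====

-- ---------- layer 1: A's re-sorting loop equals a sorted-list loop with single re-insertion ----------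

def reinsertGo (p : String) (c : Int) : List (String × Int) → List (String × Int)
  | [] => [(p, c)]
  | y :: ys => if c < y.2 then y :: reinsertGo p c ys else (p, c) :: y :: ys

def reinsert (rest : List (String × Int)) (p : String) (c : Int) : List (String × Int) :=
  if c ≤ 0 then rest else reinsertGo p c rest

def solveLoopR : Nat → List String → List (String × Int) → Int → List String
  | 0, plan, _, _ => plan
  | Nat.succ f, plan, lst, total =>
    match lst with
    | [] => plan
    | (p, c) :: rest =>
      let lst1 := reinsert rest p (c - 1)
      let total1 := total - 1
      match lst1 with
      | [] => plan ++ [p]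
      | (q, d) :: rest2 =>
        if 2 * d > total1 then
          solveLoopR f (plan ++ [p ++ q]) (reinsert rest2 q (d - 1)) (total1 - 1)
        else
          solveLoopR f (plan ++ [p]) lst1 total1

theorem loopR_nil (f : Nat) (plan : List String) (t : Int) :
    solveLoopR f plan [] t = plan := by
  cases f <;> rfl

-- inserting z never passes a head hd with hd.2 ≥ z.2 (stability of the reverse insertion sort)
theorem foldl_insertBy_cons (rest : List (String × Int)) (hd : String × Int)
    (t : List (String × Int)) (h : ∀ z ∈ rest, ¬ hd.2 < z.2) :
    List.foldl (fun acc x => PySem.List.insertBy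
        (fun a b : String × Int => decide (b.2 < a.2)) x acc) (hd :: t) rest
      = hd :: List.foldl (fun acc x => PySem.List.insertBy
        (fun a b : String × Int => decide (b.2 < a.2)) x acc) t rest := by
  induction rest generalizing t with
  | nil => rfl
  | cons y ys ih =>
    have hy : ¬ hd.2 < y.2 := h y (by simp)
    simp only [List.foldl_cons, PySem.List.insertBy, hy, decide_false]
    exact ih _ (fun z hz => h z (by simp [hz]))

-- stably re-sorting (p,c) :: rest (rest already sorted descending) is exactly
-- the re-insertion of (p,c) after the strictly larger and before the equal counts
theorem foldl_insertBy_singleton (p : String) (c : Int) (rest : List (String × Int))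
    (h : rest.Pairwise (fun a b => b.2 ≤ a.2)) :
    List.foldl (fun acc x => PySem.List.insertBy
        (fun a b : String × Int => decide (b.2 < a.2)) x acc) [(p, c)] rest
      = reinsertGo p c rest := by
  induction rest with
  | nil => rfl
  | cons y ys ih =>
    rcases List.pairwise_cons.mp h with ⟨h1, h2⟩
    by_cases hc : c < y.2
    · simp only [List.foldl_cons, PySem.List.insertBy, hc, decide_true, if_true]
      rw [foldl_insertBy_cons ys y [(p, c)] (fun z hz => not_lt.mpr (h1 z hz)), ih h2]
      simp [reinsertGo, hc]
    · simp only [List.foldl_cons, PySem.List.insertBy, decide_eq_true_eq, if_neg hc]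
      rw [foldl_insertBy_cons ys (p, c) [y] (fun z hz => by
        have := h1 z hz; simp only [not_lt] at hc ⊢; exact le_trans this hc)]
      have : List.foldl (fun acc x => PySem.List.insertBy
          (fun a b : String × Int => decide (b.2 < a.2)) x acc) [y] ys
          = PySem.List.sorted (y :: ys) (fun e => e.2) true := by
        rw [PySem.List.sorted_rev_eq_foldl_insertBy]; rfl
      rw [this, PySem.List.sorted_rev_eq_self_of_pairwise _ _ h]
      simp [reinsertGo, hc]

theorem sorted_cons_eq_reinsertGo (p : String) (c : Int) (rest : List (String × Int))
    (h : rest.Pairwise (fun a b => b.2 ≤ a.2)) :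
    PySem.List.sorted ((p, c) :: rest) (fun e => e.2) true = reinsertGo p c rest := by
  rw [PySem.List.sorted_rev_eq_foldl_insertBy]
  exact foldl_insertBy_singleton p c rest h

theorem mem_reinsertGo (x : String × Int) (p : String) (c : Int)
    (rest : List (String × Int)) :
    x ∈ reinsertGo p c rest ↔ x = (p, c) ∨ x ∈ rest := by
  induction rest with
  | nil => simp [reinsertGo]
  | cons y ys ih =>
    by_cases hc : c < y.2 <;> simp [reinsertGo, hc, ih] <;> tauto

theorem pairwise_reinsertGo (p : String) (c : Int) (rest : List (String × Int))
    (h : rest.Pairwise (fun a b => b.2 ≤ a.2)) :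
    (reinsertGo p c rest).Pairwise (fun a b => b.2 ≤ a.2) := by
  induction rest with
  | nil => simp [reinsertGo]
  | cons y ys ih =>
    rcases List.pairwise_cons.mp h with ⟨h1, h2⟩
    by_cases hc : c < y.2
    · simp only [reinsertGo, hc, if_true]
      refine List.pairwise_cons.mpr ⟨fun z hz => ?_, ih h2⟩
      rcases (mem_reinsertGo z p c ys).mp hz with rfl | hz'
      · exact le_of_lt hc
      · exact h1 z hz'
    · simp only [reinsertGo, if_neg hc]
      push_neg at hc
      refine List.pairwise_cons.mpr ⟨fun z hz => ?_, h⟩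
      rcases List.mem_cons.mp hz with rfl | hz'
      · exact hc
      · exact le_trans (h1 z hz') hc

theorem sum_reinsertGo (p : String) (c : Int) (rest : List (String × Int)) :
    ((reinsertGo p c rest).map (fun x => x.2)).sum = c + ((rest.map (fun x => x.2)).sum) := by
  induction rest with
  | nil => simp [reinsertGo]
  | cons y ys ih =>
    by_cases hc : c < y.2 <;> simp [reinsertGo, hc, ih] <;> ring

theorem reinsertGo_ne_nil (p : String) (c : Int) (rest : List (String × Int)) :
    reinsertGo p c rest ≠ [] := by
  cases rest with
  | nil => simp [reinsertGo]
  | cons y ys => by_cases hc : c < y.2 <;> simp [reinsertGo, hc]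

theorem pickTail_eq (f : Nat) (plan1 plan2 : List String) (q : String) (d : Int)
    (rest2 : List (String × Int)) (total1 : Int)
    (hpw : ((q, d) :: rest2).Pairwise (fun a b : String × Int => b.2 ≤ a.2))
    (hpos : ∀ x ∈ (q, d) :: rest2, (1:Int) ≤ x.2)
    (htot : total1 = (((q, d) :: rest2).map (fun x => x.2)).sum)
    (IH : ∀ (plan : List String) (l : List (String × Int)) (total : Int),
      l.Pairwise (fun a b => b.2 ≤ a.2) → (∀ x ∈ l, (1:Int) ≤ x.2) →
      total = (l.map (fun x => x.2)).sum → solveLoopA f plan l = solveLoopR f plan l total) :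
    (if d * 2 ≤ (((q, d) :: rest2).map (fun x => x.2)).sum then
        solveLoopA f plan1 ((q, d) :: rest2)
      else
        if (if d - 1 = 0 then rest2 else (q, d - 1) :: rest2) = [] then plan2
        else solveLoopA f plan2
          (PySem.List.sorted (if d - 1 = 0 then rest2 else (q, d - 1) :: rest2) (fun e => e.2) true))
    = (if 2 * d > total1 then
        solveLoopR f plan2 (reinsert rest2 q (d - 1)) (total1 - 1)
      else solveLoopR f plan1 ((q, d) :: rest2) total1) := by
  rcases List.pairwise_cons.mp hpw with ⟨hq1, hq2⟩
  have hd1 : (1:Int) ≤ d := hpos (q, d) (by simp)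
  have hS : (((q, d) :: rest2).map (fun x => x.2)).sum = d + (rest2.map (fun x => x.2)).sum := by
    simp
  set S := (rest2.map (fun x => x.2)).sum with hSdef
  have hsort : PySem.List.sorted (if d - 1 = 0 then rest2 else (q, d - 1) :: rest2)
      (fun e => e.2) true = reinsert rest2 q (d - 1) := by
    by_cases h0 : d - 1 = 0
    · simp only [h0, if_true, reinsert, if_pos (le_refl (0:Int))]
      exact PySem.List.sorted_rev_eq_self_of_pairwise _ _ hq2
    · simp only [h0, if_false, reinsert, if_neg (by omega : ¬ d - 1 ≤ 0)]
      exact sorted_cons_eq_reinsertGo q (d - 1) rest2 hq2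
  by_cases hcond : d * 2 ≤ (((q, d) :: rest2).map (fun x => x.2)).sum
  · rw [if_pos hcond, if_neg (by rw [hS] at hcond; omega : ¬ 2 * d > total1)]
    exact IH plan1 ((q, d) :: rest2) total1 hpw hpos htot
  · rw [if_neg hcond, if_pos (by rw [hS] at hcond; omega : 2 * d > total1)]
    by_cases h40 : (if d - 1 = 0 then rest2 else (q, d - 1) :: rest2) = []
    · rw [if_pos h40]
      have h0 : d - 1 = 0 ∧ rest2 = [] := by
        by_cases hd0 : d - 1 = 0
        · exact ⟨hd0, by simpa [hd0] using h40⟩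
        · simp [hd0] at h40
      have : reinsert rest2 q (d - 1) = [] := by
        simp [reinsert, h0.1, h0.2]
      rw [this, loopR_nil]
    · rw [if_neg h40, hsort]
      by_cases hd0 : d - 1 = 0
      · have hre : reinsert rest2 q (d - 1) = rest2 := by simp [reinsert, hd0]
        rw [hre]
        refine IH plan2 rest2 (total1 - 1) hq2 (fun x hx => hpos x (by simp [hx])) ?_
        rw [htot, hS]; omega
      · have hre : reinsert rest2 q (d - 1) = reinsertGo q (d - 1) rest2 := by
          unfold reinsert; rw [if_neg (by omega : ¬ d - 1 ≤ 0)]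
        rw [hre]
        refine IH plan2 (reinsertGo q (d - 1) rest2) (total1 - 1)
          (pairwise_reinsertGo q (d - 1) rest2 hq2) ?_ ?_
        · intro x hx
          rcases (mem_reinsertGo x q (d - 1) rest2).mp hx with rfl | hx'
          · simp; omega
          · exact hpos x (by simp [hx'])
        · rw [htot, hS, sum_reinsertGo]; omega

theorem loopA_eq_loopR (f : Nat) (plan : List String) (l : List (String × Int)) (total : Int)
    (hpw : l.Pairwise (fun a b => b.2 ≤ a.2)) (hpos : ∀ x ∈ l, (1:Int) ≤ x.2)
    (htot : total = (l.map (fun x => x.2)).sum) :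
    solveLoopA f plan l = solveLoopR f plan l total := by
  induction f generalizing plan l total with
  | zero => rfl
  | succ f ih =>
    cases l with
    | nil => rfl
    | cons hd rest =>
      obtain ⟨p, c⟩ := hd
      rcases List.pairwise_cons.mp hpw with ⟨hr1, hr2⟩
      have hc1 : (1:Int) ≤ c := hpos (p, c) (by simp)
      have hrpos : ∀ x ∈ rest, (1:Int) ≤ x.2 := fun x hx => hpos x (by simp [hx])
      have hplan : ∀ s q : String, ((plan ++ [s]).dropLast ++ [(plan ++ [s]).getLastD "" ++ q])
          = plan ++ [s ++ q] := by
        intro s q; simp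
      simp only [solveLoopA, solveLoopR]
      by_cases hc0 : c - 1 = 0
      · simp only [hc0, if_true]
        have hre : reinsert rest p 0 = rest := by simp [reinsert]
        rw [PySem.List.sorted_rev_eq_self_of_pairwise _ _ hr2, hre]
        cases rest with
        | nil => simp
        | cons hd2 rest2 =>
          obtain ⟨q, d⟩ := hd2
          rw [if_neg (List.cons_ne_nil _ _)]
          simp only [List.headD_cons]
          rw [hplan]
          exact pickTail_eq f (plan ++ [p]) (plan ++ [p ++ q]) q d rest2 (total - 1) hr2
            hrpos (by rw [htot]; simp; omega) ih
      · simp only [hc0, if_false]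
        rw [if_neg (List.cons_ne_nil _ _)]
        have hre : reinsert rest p (c - 1) = reinsertGo p (c - 1) rest := by
          unfold reinsert; rw [if_neg (by omega : ¬ c - 1 ≤ 0)]
        rw [sorted_cons_eq_reinsertGo p (c - 1) rest hr2, hre]
        have hLpw : (reinsertGo p (c - 1) rest).Pairwise (fun a b : String × Int => b.2 ≤ a.2) :=
          pairwise_reinsertGo p (c - 1) rest hr2
        have hLpos : ∀ x ∈ reinsertGo p (c - 1) rest, (1:Int) ≤ x.2 := by
          intro x hx
          rcases (mem_reinsertGo x p (c - 1) rest).mp hx with rfl | hx'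
          · simp; omega
          · exact hrpos x hx'
        have hLsum : (total - 1) = ((reinsertGo p (c - 1) rest).map (fun x => x.2)).sum := by
          rw [sum_reinsertGo, htot]; simp; omega
        rcases hL : reinsertGo p (c - 1) rest with _ | ⟨⟨q, d⟩, rest2⟩
        · exact absurd hL (reinsertGo_ne_nil p (c - 1) rest)
        · rw [hL] at hLpw hLpos hLsum
          simp only [List.headD_cons]
          rw [hplan]
          exact pickTail_eq f (plan ++ [p]) (plan ++ [p ++ q]) q d rest2 (total - 1) hLpw
            hLpos hLsum ih

-- ---------- layer 2: the sorted-list loop equals B's fixed-table loop ----------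

-- strict lexicographic order on (count, stamp)
def lexLt (x y : Int × Int) : Prop := x.1 < y.1 ∨ (x.1 = y.1 ∧ x.2 < y.2)

theorem lexLt_asymm (x y : Int × Int) (h : lexLt x y) : ¬ lexLt y x := by
  unfold lexLt at *; omega

theorem pairGtB_eq (x y : Int × Int) : pairGtB x y = true ↔ lexLt y x := by
  unfold pairGtB lexLt
  constructor
  · intro h; simp at h; omega
  · intro h; simp; omega

-- ghost-annotated entries (party index, count, stamp); erasing the stamp gives A's entries
def eraseA (e : Int × Int × Int) : String × Int := (chrOf e.1, e.2.1)

-- the invariant tying the sorted list of layer 1 to B's fixed table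
def RelBC (lst : List (String × Int)) (state : List (Int × Int)) (total t : Int) : Prop :=
  ∃ anno : List (Int × Int × Int),
    lst = anno.map eraseA ∧
    anno.Pairwise (fun a b => lexLt b.2 a.2) ∧
    (∀ e ∈ anno, 0 ≤ e.1 ∧ e.1 < (state.length : Int) ∧ 0 < e.2.1 ∧ e.2.2 < t ∧
      state[e.1.toNat]? = some e.2) ∧
    (∀ (k : Nat) (hk : k < state.length), 0 < (state[k]'hk).1 → ∃ e ∈ anno, e.1 = (k : Int)) ∧
    total = (anno.map (fun e => e.2.1)).sum

-- the running accumulator of the argmax scan, after the first n indices were processed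
def GoodAcc (state : List (Int × Int)) (m n : Nat) (acc : Int × (Int × Int)) : Prop :=
  (m < n ∧ acc = ((m : Int), state.getD m (0, 0))) ∨
  (n ≤ m ∧ (acc = (-1, (0, 0)) ∨ ∃ k : Nat, k < n ∧ 0 < (state.getD k (0, 0)).1 ∧
      acc = ((k : Int), state.getD k (0, 0)) ∧ lexLt (state.getD k (0, 0)) (state.getD m (0, 0))))

theorem argmax_fold (state : List (Int × Int)) (m : Nat) (hm : m < state.length)
    (halive : 0 < (state.getD m (0, 0)).1)
    (hmax : ∀ k : Nat, k < state.length → k ≠ m → 0 < (state.getD k (0, 0)).1 →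
      lexLt (state.getD k (0, 0)) (state.getD m (0, 0)))
    (ys : List (Int × Int)) (s : Nat) (acc : Int × (Int × Int))
    (hdrop : state.drop s = ys) (hacc : GoodAcc state m s acc) :
    GoodAcc state m (s + ys.length)
      ((PySem.List.enumerate ys (s : Int)).foldl
        (fun acc x => if 0 < x.2.1 ∧ (acc.1 < 0 ∨ pairGtB x.2 acc.2 = true) then x else acc) acc) := by
  induction ys generalizing s acc with
  | nil => simpa [PySem.List.enumerate_nil] using hacc
  | cons y ys ih =>
    have hslen : s < state.length := by
      by_contra hs
      rw [List.drop_eq_nil_of_le (by omega)] at hdrop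
      simp at hdrop
    have hy? : state[s]? = some y := by
      have h0 : (state.drop s)[0]? = some y := by rw [hdrop]; rfl
      rw [List.getElem?_drop] at h0
      simpa using h0
    have hy : state.getD s (0, 0) = y := by
      simp [List.getD_eq_getElem?_getD, hy?]
    have hdrop' : state.drop (s + 1) = ys := by
      rw [← List.tail_drop, hdrop]
      rfl
    have hacc1 : GoodAcc state m (s + 1)
        (if 0 < y.1 ∧ ((acc.1) < 0 ∨ pairGtB y acc.2 = true) then ((s : Int), y) else acc) := by
      rcases hacc with ⟨hmn, hae⟩ | ⟨hnm, hrest⟩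
      · -- m already found: the scan never replaces it
        have hms : s ≠ m := by omega
        by_cases hcond : 0 < y.1 ∧ ((acc.1) < 0 ∨ pairGtB y acc.2 = true)
        · exfalso
          have hne : ¬ acc.1 < 0 := by
            rw [hae]
            show ¬ (m : Int) < 0
            omega
          rcases hcond.2 with h | h
          · exact hne h
          · have hlt : lexLt acc.2 y := (pairGtB_eq _ _).mp h
            rw [hae] at hlt
            have hmaxs := hmax s hslen hms (by rw [hy]; exact hcond.1)
            rw [hy] at hmaxs
            exact lexLt_asymm _ _ hmaxs hlt
        · rw [if_neg hcond]
          exact Or.inl ⟨by omega, hae⟩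
      · by_cases hms : m = s
        · subst hms
          have hcond : 0 < y.1 ∧ ((acc.1) < 0 ∨ pairGtB y acc.2 = true) := by
            refine ⟨by rw [← hy]; exact halive, ?_⟩
            rcases hrest with hae | ⟨k, hk, hal, hae, hlt⟩
            · refine Or.inl ?_
              rw [hae]
              show (-1 : Int) < 0
              norm_num
            · refine Or.inr ((pairGtB_eq _ _).mpr ?_)
              rw [hae, ← hy]
              exact hlt
          rw [if_pos hcond]
          exact Or.inl ⟨by omega, by rw [hy]⟩
        · have hsm : s < m := by omega
          by_cases hcond : 0 < y.1 ∧ ((acc.1) < 0 ∨ pairGtB y acc.2 = true)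
          · rw [if_pos hcond]
            refine Or.inr ⟨by omega, Or.inr ⟨s, by omega, by rw [hy]; exact hcond.1, by rw [hy],
              ?_⟩⟩
            exact hmax s hslen (by omega) (by rw [hy]; exact hcond.1)
          · rw [if_neg hcond]
            refine Or.inr ⟨by omega, ?_⟩
            rcases hrest with hae | ⟨k, hk, hal, hae, hlt⟩
            · exact Or.inl hae
            · exact Or.inr ⟨k, by omega, hal, hae, hlt⟩
    have hstep := ih (s + 1) _ hdrop' hacc1
    rw [PySem.List.enumerate_cons, List.foldl_cons]
    have hcast : ((s : Int) + 1) = ((s + 1 : Nat) : Int) := by push_cast; ring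
    rw [hcast]
    have hlen : s + (y :: ys).length = (s + 1) + ys.length := by simp; omega
    rw [hlen]
    exact hstep

-- the argmax scan returns m whenever m is alive and strictly lex-greater than every other alive index
theorem argmax_spec (state : List (Int × Int)) (m : Nat) (hm : m < state.length)
    (halive : 0 < (state.getD m (0, 0)).1)
    (hmax : ∀ k : Nat, k < state.length → k ≠ m → 0 < (state.getD k (0, 0)).1 →
      lexLt (state.getD k (0, 0)) (state.getD m (0, 0))) :
    argmaxB state = (m : Int) := by
  have h := argmax_fold state m hm halive hmax state 0 (-1, (0, 0)) rfl
    (Or.inr ⟨Nat.zero_le m, Or.inl rfl⟩)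
  rcases h with ⟨_, hae⟩ | ⟨hlen, _⟩
  · unfold argmaxB
    rw [show PySem.List.enumerate state = PySem.List.enumerate state ((0 : Nat) : Int) from rfl]
    rw [hae]
  · simp only [Nat.zero_add] at hlen
    omega

theorem loopC_done (f : Nat) (plan : List String) (state : List (Int × Int)) (total t : Int)
    (h : total ≤ 0) : solveLoopC f plan state total t = plan := by
  cases f with
  | zero => rfl
  | succ f => simp only [solveLoopC, if_pos h]

-- insertion before the equal counts, on annotated entries (mirrors reinsertGo)
def insHigh (e : Int × Int × Int) : List (Int × Int × Int) → List (Int × Int × Int)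
  | [] => [e]
  | y :: ys => if e.2.1 < y.2.1 then y :: insHigh e ys else e :: y :: ys

theorem insHigh_perm (e : Int × Int × Int) (l : List (Int × Int × Int)) :
    (insHigh e l).Perm (e :: l) := by
  induction l with
  | nil => simp [insHigh]
  | cons y ys ih =>
    by_cases hc : e.2.1 < y.2.1
    · simp only [insHigh, if_pos hc]
      exact (ih.cons y).trans (List.Perm.swap e y ys)
    · simp [insHigh, hc]

theorem map_eraseA_insHigh (e : Int × Int × Int) (l : List (Int × Int × Int)) :
    (insHigh e l).map eraseA = reinsertGo (chrOf e.1) e.2.1 (l.map eraseA) := by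
  induction l with
  | nil => rfl
  | cons y ys ih =>
    by_cases hc : e.2.1 < y.2.1
    · simp only [insHigh, if_pos hc, List.map_cons, ih, reinsertGo]
      rw [if_pos (by simpa [eraseA] using hc)]
    · simp only [insHigh, if_neg hc, List.map_cons, reinsertGo]
      rw [if_neg (by simpa [eraseA] using hc)]
      rfl

theorem pairwise_insHigh (e : Int × Int × Int) (l : List (Int × Int × Int))
    (hpw : l.Pairwise (fun a b => lexLt b.2 a.2))
    (hst : ∀ y ∈ l, y.2.2 < e.2.2) :
    (insHigh e l).Pairwise (fun a b => lexLt b.2 a.2) := by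
  induction l with
  | nil => simp [insHigh]
  | cons y ys ih =>
    rcases List.pairwise_cons.mp hpw with ⟨h1, h2⟩
    by_cases hc : e.2.1 < y.2.1
    · simp only [insHigh, if_pos hc]
      refine List.pairwise_cons.mpr ⟨fun z hz => ?_, ih h2 (fun z hz => hst z (by simp [hz]))⟩
      rcases List.mem_cons.mp ((insHigh_perm e ys).mem_iff.mp hz) with heq | hz'
      · rw [heq]; exact Or.inl hc
      · exact h1 z hz'
    · simp only [insHigh, if_neg hc]
      refine List.pairwise_cons.mpr ⟨fun z hz => ?_, hpw⟩
      rcases List.mem_cons.mp hz with rfl | hz'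
      · have := hst z (by simp)
        unfold lexLt; omega
      · have hzy := h1 z hz'
        have := hst z (by simp [hz'])
        unfold lexLt at hzy ⊢; omega

-- one pick: decrement the head entry with a fresh maximal stamp
theorem Rel_step (state : List (Int × Int)) (t : Int) (a : Int × Int × Int)
    (arest : List (Int × Int × Int))
    (hpw : (a :: arest).Pairwise (fun x y => lexLt y.2 x.2))
    (hmem : ∀ e ∈ a :: arest, 0 ≤ e.1 ∧ e.1 < (state.length : Int) ∧ 0 < e.2.1 ∧ e.2.2 < t ∧
      state[e.1.toNat]? = some e.2)
    (hsurj : ∀ (k : Nat) (hk : k < state.length), 0 < (state[k]'hk).1 → ∃ e ∈ a :: arest, e.1 = (k : Int)) :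
    RelBC (reinsert (arest.map eraseA) (chrOf a.1) (a.2.1 - 1))
        (PySem.List.pySetD state a.1 (a.2.1 - 1, t))
        ((((a :: arest).map (fun e => e.2.1)).sum) - 1) (t + 1) := by
  obtain ⟨ha0, halen, hapos, hast, haget⟩ := hmem a (by simp)
  have hcast : ((a.1.toNat : Int)) = a.1 := Int.toNat_of_nonneg ha0
  have hlt : a.1.toNat < state.length := by omega
  rcases List.pairwise_cons.mp hpw with ⟨hpw1, hpw2⟩
  have hidx : ∀ e ∈ arest, e.1 ≠ a.1 := by
    intro e he heq
    obtain ⟨_, _, _, _, heget⟩ := hmem e (by simp [he])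
    rw [heq, haget] at heget
    have h3 : e.2 = a.2 := Option.some.inj heget.symm
    have h4 := hpw1 e he
    rw [h3] at h4
    unfold lexLt at h4
    omega
  have hidxN : ∀ e ∈ arest, 0 ≤ e.1 → e.1.toNat ≠ a.1.toNat := by
    intro e he he0 heq
    exact hidx e he (by omega)
  rw [PySem.List.pySetD_of_nonneg state _ ha0]
  have hmem' : ∀ e ∈ arest, 0 ≤ e.1 ∧ e.1 < ((state.set a.1.toNat (a.2.1 - 1, t)).length : Int) ∧
      0 < e.2.1 ∧ e.2.2 < t + 1 ∧ (state.set a.1.toNat (a.2.1 - 1, t))[e.1.toNat]? = some e.2 := by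
    intro e he
    obtain ⟨he0, helen, hepos, hest, heget⟩ := hmem e (by simp [he])
    refine ⟨he0, by rw [List.length_set]; exact helen, hepos, by omega, ?_⟩
    rw [List.getElem?_set_ne (fun h => hidxN e he he0 h.symm)]
    exact heget
  have hsurj' : ∀ (k : Nat) (hk : k < (state.set a.1.toNat (a.2.1 - 1, t)).length),
      0 < (((state.set a.1.toNat (a.2.1 - 1, t))[k]'hk)).1 → k = a.1.toNat ∨ ∃ e ∈ arest, e.1 = (k : Int) := by
    intro k hk hkpos
    by_cases hks : k = a.1.toNat
    · exact Or.inl hks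
    · have hk' : k < state.length := by rw [List.length_set] at hk; exact hk
      have hkget : (state.set a.1.toNat (a.2.1 - 1, t))[k]? = state[k]? :=
        List.getElem?_set_ne (fun h => hks h.symm)
      have hkval : (state.set a.1.toNat (a.2.1 - 1, t))[k]'hk = state[k]'hk' := by
        have h1 : (state.set a.1.toNat (a.2.1 - 1, t))[k]? = some ((state.set a.1.toNat (a.2.1 - 1, t))[k]'hk) :=
          List.getElem?_eq_some_iff.mpr ⟨hk, rfl⟩
        have h2 : state[k]? = some (state[k]'hk') := List.getElem?_eq_some_iff.mpr ⟨hk', rfl⟩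
        rw [h1, h2] at hkget
        exact Option.some.inj hkget
      rw [hkval] at hkpos
      rcases hsurj k hk' hkpos with ⟨e, he, hee⟩
      rcases List.mem_cons.mp he with heq | he'
      · exfalso
        rw [heq] at hee
        exact hks (by omega)
      · exact Or.inr ⟨e, he', hee⟩
  by_cases hc1 : a.2.1 - 1 ≤ 0
  · refine ⟨arest, by simp [reinsert, hc1], hpw2, hmem', ?_, ?_⟩
    · intro k hk hkpos
      rcases hsurj' k hk hkpos with hks | h
      · exfalso
        have hkget : (state.set a.1.toNat (a.2.1 - 1, t))[k]? = some (a.2.1 - 1, t) := by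
          rw [hks]; exact List.getElem?_set_self hlt
        have h1 : (state.set a.1.toNat (a.2.1 - 1, t))[k]? = some ((state.set a.1.toNat (a.2.1 - 1, t))[k]'hk) :=
          List.getElem?_eq_some_iff.mpr ⟨hk, rfl⟩
        rw [h1] at hkget
        have := Option.some.inj hkget
        rw [this] at hkpos
        simp at hkpos
        omega
      · exact h
    · simp only [List.map_cons, List.sum_cons]
      omega
  · have hperm := insHigh_perm (a.1, a.2.1 - 1, t) arest
    refine ⟨insHigh (a.1, a.2.1 - 1, t) arest, ?_, ?_, ?_, ?_, ?_⟩
    · rw [show reinsert (arest.map eraseA) (chrOf a.1) (a.2.1 - 1)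
          = reinsertGo (chrOf a.1) (a.2.1 - 1) (arest.map eraseA) from by
        unfold reinsert; rw [if_neg hc1]]
      exact (map_eraseA_insHigh (a.1, a.2.1 - 1, t) arest).symm
    · exact pairwise_insHigh _ _ hpw2 (fun y hy => (hmem y (by simp [hy])).2.2.2.1)
    · intro e he
      rcases List.mem_cons.mp (hperm.mem_iff.mp he) with rfl | he'
      · refine ⟨ha0, by rw [List.length_set]; exact halen, ?_, ?_, ?_⟩
        · show (0 : Int) < a.2.1 - 1
          omega
        · show t < t + 1
          omega
        · exact List.getElem?_set_self hlt
      · exact hmem' e he'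
    · intro k hk hkpos
      rcases hsurj' k hk hkpos with hks | ⟨e, he, hee⟩
      · refine ⟨(a.1, a.2.1 - 1, t), hperm.mem_iff.mpr (by simp), ?_⟩
        show a.1 = (k : Int)
        rw [hks]
        exact hcast.symm
      · exact ⟨e, hperm.mem_iff.mpr (by simp [he]), hee⟩
    · have hsum := (hperm.map (fun e => e.2.1)).sum_eq
      simp only [List.map_cons, List.sum_cons] at hsum ⊢
      omega

-- the head of the annotated list is what the argmax scan finds
theorem argmax_head (state : List (Int × Int)) (t : Int) (a : Int × Int × Int)
    (arest : List (Int × Int × Int))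
    (hpw : (a :: arest).Pairwise (fun x y => lexLt y.2 x.2))
    (hmem : ∀ e ∈ a :: arest, 0 ≤ e.1 ∧ e.1 < (state.length : Int) ∧ 0 < e.2.1 ∧ e.2.2 < t ∧
      state[e.1.toNat]? = some e.2)
    (hsurj : ∀ (k : Nat) (hk : k < state.length), 0 < (state[k]'hk).1 → ∃ e ∈ a :: arest, e.1 = (k : Int)) :
    argmaxB state = a.1 ∧ (PySem.List.pyGet? state a.1).getD (0, 0) = a.2 := by
  obtain ⟨ha0, halen, hapos, hast, haget⟩ := hmem a (by simp)
  have hcast : ((a.1.toNat : Int)) = a.1 := Int.toNat_of_nonneg ha0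
  have hlt : a.1.toNat < state.length := by omega
  rcases List.pairwise_cons.mp hpw with ⟨hpw1, hpw2⟩
  have hgetD : state.getD a.1.toNat (0, 0) = a.2 := by
    rw [List.getD_eq_getElem?_getD, haget]
    rfl
  have hmax : ∀ k : Nat, k < state.length → k ≠ a.1.toNat → 0 < (state.getD k (0, 0)).1 →
      lexLt (state.getD k (0, 0)) (state.getD a.1.toNat (0, 0)) := by
    intro k hk hkm hkpos
    have hkget : state[k]? = some (state[k]'hk) := List.getElem?_eq_some_iff.mpr ⟨hk, rfl⟩
    have hkD : state.getD k (0, 0) = state[k]'hk := by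
      rw [List.getD_eq_getElem?_getD, hkget]
      rfl
    rw [hkD] at hkpos ⊢
    rcases hsurj k hk hkpos with ⟨e, he, hee⟩
    rcases List.mem_cons.mp he with heq | he'
    · exfalso
      rw [heq] at hee
      exact hkm (by omega)
    · obtain ⟨_, _, _, _, heget⟩ := hmem e (by simp [he'])
      have : state[k]? = some e.2 := by rw [← heget, hee]; simp
      rw [hkget] at this
      rw [Option.some.inj this, hgetD]
      exact hpw1 e he'
  have halive' : 0 < (state.getD a.1.toNat (0, 0)).1 := by rw [hgetD]; exact hapos
  have h1 := argmax_spec state a.1.toNat hlt halive' hmax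
  rw [hcast] at h1
  refine ⟨h1, ?_⟩
  rw [PySem.List.pyGet?_of_nonneg state ha0, haget]
  rfl

theorem sum_pos_of_mem_pos (l : List (Int × Int × Int))
    (h : ∀ e ∈ l, 0 < e.2.1) (hne : l ≠ []) :
    0 < (l.map (fun e => e.2.1)).sum := by
  cases l with
  | nil => exact absurd rfl hne
  | cons x xs =>
    have h0 : (0:Int) ≤ (xs.map (fun e => e.2.1)).sum :=
      List.sum_nonneg (by
        intro y hy
        rcases List.mem_map.mp hy with ⟨e, he, rfl⟩
        exact le_of_lt (h e (by simp [he])))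
    have := h x (by simp)
    simp only [List.map_cons, List.sum_cons]
    omega

theorem loopR_eq_loopC (f : Nat) (plan : List String) (lst : List (String × Int))
    (state : List (Int × Int)) (total t : Int) (h : RelBC lst state total t) :
    solveLoopR f plan lst total = solveLoopC f plan state total t := by
  induction f generalizing plan lst state total t with
  | zero => rfl
  | succ f ih =>
    obtain ⟨anno, hlst, hpw, hmem, hsurj, htot⟩ := h
    cases anno with
    | nil =>
      rw [hlst, List.map_nil, loopR_nil, loopC_done _ _ _ _ _ (by simp at htot; omega)]
    | cons a arest =>
      have htpos : 0 < total := by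
        rw [htot]
        exact sum_pos_of_mem_pos _ (fun e he => (hmem e he).2.2.1) (by simp)
      have hhead := argmax_head state t a arest hpw hmem hsurj
      have hstep := Rel_step state t a arest hpw hmem hsurj
      rw [show (((a :: arest).map (fun e => e.2.1)).sum) = total from htot.symm] at hstep
      rw [hlst, List.map_cons]
      show solveLoopR (Nat.succ f) plan ((chrOf a.1, a.2.1) :: arest.map eraseA) total = _
      simp only [solveLoopR, solveLoopC]
      rw [if_neg (not_le.mpr htpos), hhead.1, hhead.2]
      obtain ⟨anno1, hlst1, hpw1, hmem1, hsurj1, htot1⟩ := hstep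
      cases anno1 with
      | nil =>
        simp only [List.map_nil, List.sum_nil] at hlst1 htot1
        rw [hlst1]
        show plan ++ [chrOf a.1] = _
        rw [if_neg (by omega : ¬ (0 : Int) < total - 1), loopC_done _ _ _ _ _ (by omega)]
      | cons b brest =>
        have ht1pos : 0 < total - 1 := by
          rw [htot1]
          exact sum_pos_of_mem_pos _ (fun e he => (hmem1 e he).2.2.1) (by simp)
        have hhead1 := argmax_head _ (t + 1) b brest hpw1 hmem1 hsurj1
        have hstep1 := Rel_step _ (t + 1) b brest hpw1 hmem1 hsurj1
        rw [show (((b :: brest).map (fun e => e.2.1)).sum) = total - 1 from htot1.symm,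
          show t + 1 + 1 = t + 2 from by ring] at hstep1
        rw [hlst1, List.map_cons]
        show (if 2 * b.2.1 > total - 1 then
            solveLoopR f (plan ++ [chrOf a.1 ++ chrOf b.1])
              (reinsert (brest.map eraseA) (chrOf b.1) (b.2.1 - 1)) (total - 1 - 1)
          else solveLoopR f (plan ++ [chrOf a.1]) ((chrOf b.1, b.2.1) :: brest.map eraseA) (total - 1)) = _
        rw [if_pos ht1pos, hhead1.1, hhead1.2]
        by_cases hcond : 2 * b.2.1 > total - 1
        · rw [if_pos hcond, if_pos hcond]
          exact ih _ _ _ _ _ hstep1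
        · rw [if_neg hcond, if_neg hcond]
          refine ih _ _ _ _ _ ⟨b :: brest, by simp [eraseA], hpw1, hmem1, hsurj1, htot1⟩

-- ---------- initialisation: the stable initial sort is the lex-sorted annotated list ----------

-- insertion after the equal counts, on annotated entries (mirrors the stable insertion sort)
def insLow (e : Int × Int × Int) : List (Int × Int × Int) → List (Int × Int × Int)
  | [] => [e]
  | y :: ys => if y.2.1 < e.2.1 then e :: y :: ys else y :: insLow e ys

theorem insLow_perm (e : Int × Int × Int) (l : List (Int × Int × Int)) :
    (insLow e l).Perm (e :: l) := by
  induction l with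
  | nil => simp [insLow]
  | cons y ys ih =>
    by_cases hc : y.2.1 < e.2.1
    · simp [insLow, hc]
    · simp only [insLow, if_neg hc]
      exact (ih.cons y).trans (List.Perm.swap e y ys)

theorem map_eraseA_insLow (e : Int × Int × Int) (l : List (Int × Int × Int)) :
    (insLow e l).map eraseA
      = PySem.List.insertBy (fun a b : String × Int => decide (b.2 < a.2)) (eraseA e)
          (l.map eraseA) := by
  induction l with
  | nil => rfl
  | cons y ys ih =>
    by_cases hc : y.2.1 < e.2.1
    · simp only [insLow, if_pos hc, List.map_cons, PySem.List.insertBy]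
      rw [if_pos (by simp [eraseA]; omega)]
    · simp only [insLow, if_neg hc, List.map_cons, PySem.List.insertBy]
      rw [if_neg (by simp [eraseA]; omega), ih]

theorem pairwise_insLow (e : Int × Int × Int) (l : List (Int × Int × Int))
    (hpw : l.Pairwise (fun a b => lexLt b.2 a.2))
    (hst : ∀ y ∈ l, e.2.2 < y.2.2) :
    (insLow e l).Pairwise (fun a b => lexLt b.2 a.2) := by
  induction l with
  | nil => simp [insLow]
  | cons y ys ih =>
    rcases List.pairwise_cons.mp hpw with ⟨h1, h2⟩
    by_cases hc : y.2.1 < e.2.1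
    · simp only [insLow, if_pos hc]
      refine List.pairwise_cons.mpr ⟨fun z hz => ?_, hpw⟩
      rcases List.mem_cons.mp hz with heq | hz'
      · rw [heq]; exact Or.inl hc
      · have := h1 z hz'
        unfold lexLt at this ⊢
        omega
    · simp only [insLow, if_neg hc]
      refine List.pairwise_cons.mpr ⟨fun z hz => ?_, ih h2 (fun z hz => hst z (by simp [hz]))⟩
      rcases List.mem_cons.mp ((insLow_perm e ys).mem_iff.mp hz) with heq | hz'
      · rw [heq]
        have := hst y (by simp)
        unfold lexLt
        omega
      · exact h1 z hz'

theorem foldl_insLow (es : List (Int × Int × Int)) (acc : List (Int × Int × Int))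
    (hacc : acc.Pairwise (fun a b => lexLt b.2 a.2))
    (hstamp : ∀ e ∈ es, ∀ y ∈ acc, e.2.2 < y.2.2)
    (hes : es.Pairwise (fun a b => b.2.2 < a.2.2)) :
    (es.foldl (fun acc e => insLow e acc) acc).Pairwise (fun a b => lexLt b.2 a.2) ∧
    (es.foldl (fun acc e => insLow e acc) acc).Perm (es ++ acc) ∧
    (es.foldl (fun acc e => insLow e acc) acc).map eraseA
      = (es.map eraseA).foldl
          (fun acc x => PySem.List.insertBy (fun a b : String × Int => decide (b.2 < a.2)) x acc)
          (acc.map eraseA) := by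
  induction es generalizing acc with
  | nil => exact ⟨hacc, by simp, rfl⟩
  | cons e es ih =>
    rcases List.pairwise_cons.mp hes with ⟨he1, he2⟩
    have hacc1 : (insLow e acc).Pairwise (fun a b => lexLt b.2 a.2) :=
      pairwise_insLow e acc hacc (hstamp e (by simp))
    have hstamp1 : ∀ e' ∈ es, ∀ y ∈ insLow e acc, e'.2.2 < y.2.2 := by
      intro e' he' y hy
      rcases List.mem_cons.mp ((insLow_perm e acc).mem_iff.mp hy) with heq | hy'
      · rw [heq]; exact he1 e' he'
      · exact hstamp e' (by simp [he']) y hy'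
    obtain ⟨ih1, ih2, ih3⟩ := ih (insLow e acc) hacc1 hstamp1 he2
    refine ⟨ih1, ?_, ?_⟩
    · refine ih2.trans ?_
      have h1 : (es ++ insLow e acc).Perm (es ++ e :: acc) :=
        List.Perm.append_left es (insLow_perm e acc)
      exact h1.trans List.perm_middle
    · rw [List.map_cons, List.foldl_cons, ih3, map_eraseA_insLow]
      rfl

theorem init_rel (senators : List Int) (hpos : ∀ c ∈ senators, 1 ≤ c) :
    RelBC (PySem.List.sorted ((PySem.List.enumerate senators).map (fun x => (chrOf x.1, x.2)))
          (fun e => e.2) true)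
        ((PySem.List.enumerate senators).map (fun x => (x.2, -x.1)))
        senators.sum 1 := by
  have hlen : ((PySem.List.enumerate senators).map
      (fun x : Int × Int => (x.2, -x.1))).length = senators.length := by
    rw [List.length_map, PySem.List.length_enumerate]
  have hes : ((PySem.List.enumerate senators).map
      (fun x : Int × Int => (x.1, x.2, -x.1))).Pairwise (fun a b => b.2.2 < a.2.2) := by
    refine List.Pairwise.map _ ?_ (PySem.List.pairwise_lt_enumerate senators 0)
    intro a b hab
    show -b.1 < -a.1
    omega
  obtain ⟨hpw0, hperm0, hmap0⟩ := foldl_insLow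
    ((PySem.List.enumerate senators).map (fun x : Int × Int => (x.1, x.2, -x.1))) []
    (by simp) (by simp) hes
  rw [List.append_nil] at hperm0
  refine ⟨((PySem.List.enumerate senators).map (fun x : Int × Int => (x.1, x.2, -x.1))).foldl
      (fun acc e => insLow e acc) [], ?_, hpw0, ?_, ?_, ?_⟩
  · rw [PySem.List.sorted_rev_eq_foldl_insertBy, hmap0, List.map_nil, List.map_map]
    rfl
  · intro e he
    rcases List.mem_map.mp (hperm0.mem_iff.mp he) with ⟨x, hx, rfl⟩
    rcases (PySem.List.mem_enumerate_iff senators 0 x).mp hx with ⟨k, hk, rfl⟩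
    refine ⟨by simp, ?_, ?_, ?_, ?_⟩
    · show (0 : Int) + (k : Int) < _
      rw [hlen]
      omega
    · show 0 < senators[k]
      have := hpos senators[k] (List.getElem_mem hk)
      omega
    · show -((0 : Int) + (k : Int)) < 1
      omega
    · show _[((0 : Int) + (k : Int)).toNat]? = _
      have hkn : ((0 : Int) + (k : Int)).toNat = k := by omega
      rw [hkn, List.getElem?_map, PySem.List.getElem?_enumerate]
      simp [hk]
  · intro k hk hkpos
    have hk' : k < senators.length := by rw [hlen] at hk; exact hk
    refine ⟨((0 : Int) + (k : Int), senators[k]'hk', -((0 : Int) + (k : Int))),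
      hperm0.mem_iff.mpr (List.mem_map.mpr ⟨((0 : Int) + (k : Int), senators[k]'hk'),
        (PySem.List.mem_enumerate_iff senators 0 _).mpr ⟨k, hk', rfl⟩, rfl⟩), by simp⟩
  · have hsum := (hperm0.map (fun e => e.2.1)).sum_eq
    rw [hsum, List.map_map]
    have : ((fun e : Int × Int × Int => e.2.1) ∘ (fun x : Int × Int => (x.1, x.2, -x.1)))
        = (fun x : Int × Int => x.2) := rfl
    rw [this, PySem.List.map_snd_enumerate]

-- ===== VERDICT (by name: the statement is the Claim_ definition above) =====
theorem solve_spec : Claim_equal_solve := by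
  unfold Claim_equal_solve
  intro senators _ hpre
  unfold Spec_solve solve solve_alt
  have hpw : (PySem.List.sorted ((PySem.List.enumerate senators).map (fun x => (chrOf x.1, x.2)))
      (fun e => e.2) true).Pairwise (fun a b : String × Int => b.2 ≤ a.2) :=
    PySem.List.sorted_pairwise_rev _ _
  have hpos : ∀ x ∈ PySem.List.sorted ((PySem.List.enumerate senators).map
      (fun x => (chrOf x.1, x.2))) (fun e => e.2) true, (1:Int) ≤ x.2 := by
    intro x hx
    rw [PySem.List.mem_sorted] at hx
    rcases List.mem_map.mp hx with ⟨y, hy, rfl⟩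
    have hm := List.mem_map_of_mem (f := fun x : Int × Int => x.2) hy
    rw [PySem.List.map_snd_enumerate] at hm
    exact hpre.2 _ hm
  have hsum : senators.sum = ((PySem.List.sorted ((PySem.List.enumerate senators).map
      (fun x => (chrOf x.1, x.2))) (fun e => e.2) true).map (fun x => x.2)).sum := by
    have h1 : ((PySem.List.enumerate senators).map (fun x => (chrOf x.1, x.2))).map
        (fun x : String × Int => x.2) = senators := by
      rw [List.map_map]
      exact PySem.List.map_snd_enumerate senators 0
    have h2 := (PySem.List.sorted_perm ((PySem.List.enumerate senators).map
        (fun x => (chrOf x.1, x.2))) (fun e => e.2) true)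
    calc senators.sum
        = (((PySem.List.enumerate senators).map (fun x => (chrOf x.1, x.2))).map
            (fun x : String × Int => x.2)).sum := by rw [h1]
      _ = _ := ((h2.map (fun x : String × Int => x.2)).sum_eq).symm
  rw [loopA_eq_loopR _ _ _ senators.sum hpw hpos hsum]
  exact loopR_eq_loopC _ _ _ _ _ _ (init_rel senators hpre.2)

theorem solve_raises : Claim_raises_solve := by
  unfold Claim_raises_solve
  constructor
  · intro senators _ hr hpre
    exact hpre.1 hr
  · exact ⟨by decide, rfl, by decide⟩

-- self-check that the raise witness satisfies Raises_ and B's port returns the stated value there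
theorem solve_raises_witness_ok :
    Raises_solve pvRaiseWitness_solve ∧ solve_alt pvRaiseWitness_solve = pvRaiseWitnessOut_solve :=
  solve_raises.2.2
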